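-- pv_equiv track=rewrite | github.com/hyesungoh/AA_Algorithm | python/BOJ_1701.py | getLpsMax
-- ===== SOURCE A (Python) =====
-- def getLpsMax(p):
--     lps = [0 for _ in range(len(p))]
--     leng = 0
--     i = 1
--
--     while i < len(p):
--         if p[i] == p[leng]:
--             leng += 1
--             lps[i] = leng
--             i += 1
--         else:
--             if leng != 0:
--                 leng = lps[leng - 1]
--             else:
--                 lps[i] = 0
--                 i += 1
--     return max(lps)
-- ===== SOURCE B (Python) =====
-- def getLpsMax(p):
--     n = len(p)
--     arr = []
--     for i in range(n):
--         best = 0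
--         for length in range(i, 0, -1):
--             if p[:length] == p[i + 1 - length:i + 1]:
--                 best = length
--                 break
--         arr.append(best)
--     return max(arr)
-- ===== Notes on version B (the rewrite author's own statement) =====
-- stated objective: alternative
-- what changed: Replaces the single-pass KMP failure-link DP (which reuses earlier lps entries to backtrack) by an independent per-position brute-force scan that, for each index i, tries border lengths from i down to 1 and takes the first (longest) prefix/suffix match; the max of that list is returned.
import Mathlib
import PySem

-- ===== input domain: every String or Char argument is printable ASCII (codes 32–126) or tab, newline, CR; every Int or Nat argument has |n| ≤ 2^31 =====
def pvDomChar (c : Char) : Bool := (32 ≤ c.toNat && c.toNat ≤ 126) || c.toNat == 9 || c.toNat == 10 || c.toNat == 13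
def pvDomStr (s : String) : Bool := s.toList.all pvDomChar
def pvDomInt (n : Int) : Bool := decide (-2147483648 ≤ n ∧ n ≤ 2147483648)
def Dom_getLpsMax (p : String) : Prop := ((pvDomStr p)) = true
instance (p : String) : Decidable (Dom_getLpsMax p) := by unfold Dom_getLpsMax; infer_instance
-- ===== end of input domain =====

-- B computes each border length independently by a brute-force descending scan instead of A's KMP failure-link DP; same result, no speed claim.

-- ===== PORT A =====
-- KMP failure-function loop. The Python while-loop does not structurally decrease
-- (leng may be reset), so the port carries a fuel counter purely as a totalization
-- guard: fuel 2*n+1 is enough on every input (each iteration lowers 2*(n-i)+leng;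
-- the proof below goes through this measure). Indices stay Nat (provably
-- nonnegative/in range in Python); reads use getD, always in range here.
def loopA (s : List Char) : Nat → List Nat → Nat → Nat → List Nat
  | 0, lps, _, _ => lps
  | fuel+1, lps, leng, i =>
    if i < s.length then
      if s.getD i ' ' = s.getD leng ' ' then
        loopA s fuel (lps.set i (leng+1)) (leng+1) (i+1)
      else if leng ≠ 0 then
        loopA s fuel lps (lps.getD (leng-1) 0) i
      else
        loopA s fuel (lps.set i 0) leng (i+1)
    else lps

def getLpsMax (p : String) : Int :=
  -- Python's max(lps) raises ValueError on the empty list; Pre_ excludes p = "".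
  match PySem.List.max? (loopA p.toList (2*p.toList.length + 1)
      (List.replicate p.toList.length 0) 0 1) (fun x => x) with
  | some m => (m : Int)
  | none => 0

-- ===== PORT B =====
-- inner loop 'for length in range(i, 0, -1): if p[:length] == p[i+1-length:i+1]: best = length; break'
-- (descending scan stopping at the first = longest match; the slice bounds are
-- nonnegative and within the string here, so take/drop is exact for these slices).
def firstBorder (s : List Char) (i : Nat) : Nat → Nat
  | 0 => 0
  | l+1 => if s.take (l+1) = (s.take (i+1)).drop (i+1-(l+1)) then l+1 else firstBorder s i l

def getLpsMax_alt (p : String) : Int :=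
  match PySem.List.max? ((List.range p.toList.length).map
      (fun i => firstBorder p.toList i i)) (fun x => x) with
  | some m => (m : Int)
  | none => 0

-- ===== PRECONDITION & SPEC =====
-- Python's max([]) raises ValueError, so A raises exactly on the empty string; Pre_ excludes it.
def Pre_getLpsMax (p : String) : Prop := p ≠ ""
instance (p : String) : Decidable (Pre_getLpsMax p) := by unfold Pre_getLpsMax; infer_instance
def pvWitness_getLpsMax : String := "abacaba"

def Spec_getLpsMax (p : String) (out : Int) : Prop := out = getLpsMax_alt p
instance (p : String) (out : Int) : Decidable (Spec_getLpsMax p out) := by unfold Spec_getLpsMax; infer_instance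

-- ===== CLAIM (what is proved, stated in full; the proofs are below) =====
def Claim_equal_getLpsMax : Prop := ∀ (p : String), Dom_getLpsMax p → Pre_getLpsMax p → Spec_getLpsMax p (getLpsMax p)

-- ===== LEMMAS AND PROOFS =====

theorem getD_eq_getElem {α : Type} (xs : List α) (d : α) {j : Nat} (h : j < xs.length) :
    xs.getD j d = xs[j] := by
  rw [List.getD, List.getElem?_eq_getElem h, Option.getD_some]

-- pointwise characterisation of "l is a border of the length-k prefix of s"
def Brd (s : List Char) (k l : Nat) : Prop :=
  l ≤ k ∧ ∀ j, j < l → s.getD j ' ' = s.getD (k - l + j) ' '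

-- the longest proper border of the length-(i+1) prefix (B's scan as a findGreatest)
def bmax (s : List Char) (i : Nat) : Nat :=
  Nat.findGreatest (fun t => s.take t = (s.take (i+1)).drop (i+1-t)) i

theorem brd_zero (s : List Char) (k : Nat) : Brd s k 0 :=
  ⟨Nat.zero_le _, fun j hj => absurd hj (by omega)⟩

theorem brd_iff_slice (s : List Char) (i l : Nat) (hl : l ≤ i) (hi : i < s.length) :
    (s.take l = (s.take (i+1)).drop (i+1-l)) ↔ Brd s (i+1) l := by
  have key : ∀ j : Nat, ((s.take l)[j]? = ((s.take (i+1)).drop (i+1-l))[j]?) ↔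
      (j < l → s.getD j ' ' = s.getD (i+1-l+j) ' ') := by
    intro j
    rw [List.getElem?_drop, List.getElem?_take, List.getElem?_take]
    by_cases hj : j < l
    · rw [if_pos hj, if_pos (by omega)]
      have h1 : j < s.length := by omega
      have h2 : i+1-l+j < s.length := by omega
      rw [List.getElem?_eq_getElem h1, List.getElem?_eq_getElem h2,
        getD_eq_getElem s ' ' h1, getD_eq_getElem s ' ' h2]
      constructor
      · intro h _; exact Option.some.inj h
      · intro h; rw [h hj]
    · rw [if_neg hj, if_neg (by omega)]
      simp [hj]
  constructor
  · intro h
    exact ⟨by omega, fun j hj => (key j).mp (by rw [h]) hj⟩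
  · rintro ⟨-, h⟩
    apply List.ext_getElem?
    intro j
    exact (key j).mpr (fun hj => h j hj)

theorem bmax_le (s : List Char) (i : Nat) : bmax s i ≤ i := Nat.findGreatest_le i

theorem bmax_brd (s : List Char) (i : Nat) (hi : i < s.length) : Brd s (i+1) (bmax s i) := by
  rcases Nat.eq_zero_or_pos (bmax s i) with h | h
  · rw [h]; exact brd_zero s (i+1)
  · have hne : bmax s i ≠ 0 := by omega
    unfold bmax at hne
    have hp : s.take (bmax s i) = (s.take (i+1)).drop (i+1-(bmax s i)) :=
      (Nat.findGreatest_eq_iff.1 rfl).2.1 hne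
    exact (brd_iff_slice s i _ (bmax_le s i) hi).mp hp

theorem le_bmax (s : List Char) (i l : Nat) (hi : i < s.length) (hl : l ≤ i)
    (h : Brd s (i+1) l) : l ≤ bmax s i :=
  Nat.le_findGreatest hl ((brd_iff_slice s i l hl hi).mpr h)

-- nesting: a shorter border of the same prefix is a border of the longer border
theorem brd_nest {s : List Char} {k l m : Nat}
    (hl : Brd s k l) (hm : Brd s k m) (hlm : l ≤ m) : Brd s m l := by
  obtain ⟨hl1, hl2⟩ := hl
  obtain ⟨hm1, hm2⟩ := hm
  refine ⟨hlm, fun j hj => ?_⟩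
  have h1 := hl2 j hj
  have h2 := hm2 (m - l + j) (by omega)
  have e : k - m + (m - l + j) = k - l + j := by omega
  rw [e] at h2
  rw [h1, ← h2]

-- transitivity: a border of a border is a border
theorem brd_trans {s : List Char} {k l m : Nat}
    (hl : Brd s m l) (hm : Brd s k m) : Brd s k l := by
  obtain ⟨hl1, hl2⟩ := hl
  obtain ⟨hm1, hm2⟩ := hm
  refine ⟨by omega, fun j hj => ?_⟩
  have h1 := hl2 j hj
  have h2 := hm2 (m - l + j) (by omega)
  have e : k - m + (m - l + j) = k - l + j := by omega
  rw [e] at h2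
  rw [h1, h2]

-- extension: matching next characters extends a border
theorem brd_extend {s : List Char} {i l : Nat} (hl : l < i) (hi : i < s.length)
    (hb : Brd s i l) (hc : s.getD i ' ' = s.getD l ' ') : Brd s (i+1) (l+1) := by
  obtain ⟨h1, h2⟩ := hb
  refine ⟨by omega, fun j hj => ?_⟩
  rcases Nat.lt_or_ge j l with h | h
  · have := h2 j h
    have e : i + 1 - (l+1) + j = i - l + j := by omega
    rw [e]; exact this
  · have hjl : j = l := by omega
    have e : i + 1 - (l+1) + j = i := by omega
    rw [e, hjl]; exact hc.symm

-- shrink: a nonzero proper border of the length-(i+1) prefix yields one of the length-i prefix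
theorem brd_shrink {s : List Char} {i l : Nat} (hl1 : 1 ≤ l) (hl2 : l ≤ i)
    (hb : Brd s (i+1) l) : Brd s i (l-1) ∧ s.getD (l-1) ' ' = s.getD i ' ' := by
  obtain ⟨h1, h2⟩ := hb
  constructor
  · refine ⟨by omega, fun j hj => ?_⟩
    have := h2 j (by omega)
    have e : i + 1 - l + j = i - (l-1) + j := by omega
    rw [e] at this; exact this
  · have := h2 (l-1) (by omega)
    have e : i + 1 - l + (l-1) = i := by omega
    rw [e] at this; exact this

-- B's descending scan computes Nat.findGreatest (same recursion)
theorem firstBorder_eq (s : List Char) (i : Nat) :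
    ∀ l, firstBorder s i l
      = Nat.findGreatest (fun t => s.take t = (s.take (i+1)).drop (i+1-t)) l := by
  intro l
  induction l with
  | zero => rfl
  | succ l ih =>
    rw [firstBorder, Nat.findGreatest_succ, ih]

-- the KMP loop invariant, by induction over fuel
theorem loopA_correct (s : List Char) :
    ∀ fuel lps leng i,
      1 ≤ i → i ≤ s.length → leng < i →
      lps.length = s.length →
      (∀ j, j < i → lps.getD j 0 = bmax s j) →
      Brd s i leng →
      (∀ l, Brd s i l → l < i → leng < l → s.getD l ' ' ≠ s.getD i ' ') →
      2*(s.length - i) + leng < fuel →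
      (loopA s fuel lps leng i).length = s.length ∧
      ∀ j, j < s.length → (loopA s fuel lps leng i).getD j 0 = bmax s j := by
  intro fuel
  induction fuel with
  | zero => intro lps leng i _ _ _ _ _ _ _ hf; omega
  | succ fuel ih =>
    intro lps leng i h1 h2 h3 hlen hdone hbrd hskip hf
    rw [loopA]
    by_cases hin : i < s.length
    · rw [if_pos hin]
      by_cases hm : s.getD i ' ' = s.getD leng ' '
      · rw [if_pos hm]
        -- match: set lps[i] := leng+1, which is exactly bmax s i
        have hbmax : bmax s i = leng + 1 := by
          have hub : leng + 1 ≤ bmax s i :=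
            le_bmax s i (leng+1) hin (by omega) (brd_extend h3 hin hbrd hm)
          have hlb : bmax s i ≤ leng + 1 := by
            by_contra hcon
            have hb := bmax_brd s i hin
            have hsh := brd_shrink (by omega) (bmax_le s i) hb
            exact hskip (bmax s i - 1) hsh.1 (by have := bmax_le s i; omega) (by omega) hsh.2
          omega
        apply ih
        · omega
        · omega
        · omega
        · simp [hlen]
        · intro j hj
          rcases Nat.lt_or_ge j i with h | h
          · rw [List.getD, List.getElem?_set_ne (by omega)]
            exact hdone j h
          · have hji : j = i := by omega
            subst hji
            rw [List.getD, List.getElem?_set_self (by omega), Option.getD_some, hbmax]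
        · exact brd_extend h3 hin hbrd hm
        · intro l hl hli hgt
          exfalso
          have := le_bmax s i l hin (by omega) hl
          omega
        · omega
      · rw [if_neg hm]
        by_cases hz : leng ≠ 0
        · rw [if_pos hz]
          have hlng : 1 ≤ leng := by omega
          have hlps : lps.getD (leng-1) 0 = bmax s (leng-1) := hdone (leng-1) (by omega)
          have hlt : leng - 1 < s.length := by omega
          have hbm : Brd s leng (bmax s (leng-1)) := by
            have := bmax_brd s (leng-1) hlt
            have e : leng - 1 + 1 = leng := by omega
            rwa [e] at this
          apply ih
          · omega
          · omega
          · rw [hlps]; have := bmax_le s (leng-1); omega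
          · exact hlen
          · exact hdone
          · rw [hlps]; exact brd_trans hbm hbrd
          · intro l hl hli hgt
            rw [hlps] at hgt
            rcases Nat.lt_or_ge leng l with h | h
            · exact hskip l hl hli h
            · rcases Nat.eq_or_lt_of_le h with h' | h'
              · subst h'; exact fun hc => hm hc.symm
              · -- l < leng : l is then a proper border of the prefix of length leng
                exfalso
                have hnest : Brd s leng l := brd_nest hl hbrd (by omega)
                have : l ≤ bmax s (leng-1) := by
                  apply le_bmax s (leng-1) l hlt (by omega)
                  have e : leng - 1 + 1 = leng := by omega
                  rwa [e]
                omega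
          · rw [hlps]; have := bmax_le s (leng-1); omega
        · rw [if_neg hz]
          have hz0 : leng = 0 := by omega
          subst hz0
          have hbmax : bmax s i = 0 := by
            by_contra hcon
            have hb := bmax_brd s i hin
            have hsh := brd_shrink (by omega) (bmax_le s i) hb
            rcases Nat.eq_zero_or_pos (bmax s i - 1) with h0 | h0
            · rw [h0] at hsh; exact hm hsh.2.symm
            · exact hskip (bmax s i - 1) hsh.1 (by have := bmax_le s i; omega) h0 hsh.2
          apply ih
          · omega
          · omega
          · omega
          · simp [hlen]
          · intro j hj
            rcases Nat.lt_or_ge j i with h | h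
            · rw [List.getD, List.getElem?_set_ne (by omega)]
              exact hdone j h
            · have hji : j = i := by omega
              subst hji
              rw [List.getD, List.getElem?_set_self (by omega), Option.getD_some, hbmax]
          · exact brd_zero s (i+1)
          · intro l hl hli hgt
            exfalso
            have := le_bmax s i l hin (by omega) hl
            omega
          · omega
    · rw [if_neg hin]
      have hieq : i = s.length := by omega
      subst hieq
      exact ⟨hlen, fun j hj => hdone j hj⟩

-- both programs produce the same list of border maxima
theorem lists_eq (s : List Char) (hs : 1 ≤ s.length) :
    loopA s (2*s.length + 1) (List.replicate s.length 0) 0 1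
      = (List.range s.length).map (fun i => firstBorder s i i) := by
  have hmain := loopA_correct s (2*s.length + 1) (List.replicate s.length 0) 0 1
    (le_refl 1) hs (by omega) (by simp)
    (by
      intro j hj
      have hj0 : j = 0 := by omega
      subst hj0
      rw [getD_eq_getElem _ _ (by simpa using hs), List.getElem_replicate]
      rfl)
    (brd_zero s 1)
    (by intro l _ hl1 hl2; omega)
    (by omega)
  obtain ⟨hlen, hval⟩ := hmain
  apply List.ext_getElem
  · simp [hlen]
  · intro j hj1 hj2
    have hjn : j < s.length := by rwa [hlen] at hj1
    have h1 : (loopA s (2*s.length + 1) (List.replicate s.length 0) 0 1)[j] = bmax s j := by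
      rw [← getD_eq_getElem _ 0 hj1]
      exact hval j hjn
    rw [h1]
    rw [List.getElem_map, List.getElem_range, firstBorder_eq]
    rfl

-- ===== VERDICT (by name: the statement is the Claim_ definition above) =====
theorem getLpsMax_spec : Claim_equal_getLpsMax := by
  intro p _ hpre
  unfold Spec_getLpsMax getLpsMax getLpsMax_alt
  have hs : 1 ≤ p.toList.length := by
    have hne : p.toList ≠ [] := by
      intro he
      apply hpre
      have h2 := congrArg String.ofList he
      rwa [String.ofList_toList] at h2
    cases hl : p.toList with
    | nil => exact absurd hl hne
    | cons a t => simp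
  rw [lists_eq p.toList hs]
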